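-- pv_equiv track=rewrite | github.com/T313C0mun1s7/sm-logtool | sm_logtool/search.py | _candidate_window_starts
-- ===== SOURCE A (Python) =====
-- _FUZZY_ANCHOR_LIMIT = 120
--
-- def _candidate_window_starts(
--     line: str,
--     max_start: int,
--     stride: int,
--     anchor_offsets: tuple[int, ...],
--     anchor_chars: tuple[str, ...],
-- ) -> set[int]:
--     starts: set[int] = {0, max_start}
--     for start in range(0, max_start + 1, stride):
--         starts.add(start)
--
--     for offset, char in zip(anchor_offsets, anchor_chars):
--         hits = 0
--         position = line.find(char)
--         while position != -1 and hits < _FUZZY_ANCHOR_LIMIT: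
--             start = position - offset
--             if start < 0:
--                 start = 0
--             if start > max_start:
--                 start = max_start
--             starts.add(start)
--             position = line.find(char, position + 1)
--             hits += 1
--     return starts
-- ===== SOURCE B (Python) =====
-- _FUZZY_ANCHOR_LIMIT = 120
--
-- def _candidate_window_starts(
--     line: str,
--     max_start: int,
--     stride: int,
--     anchor_offsets: tuple[int, ...],
--     anchor_chars: tuple[str, ...],
-- ) -> set[int]:
--     starts: set[int] = {0, max_start, *range(0, max_start + 1, stride)}
--     for offset, char in zip(anchor_offsets, anchor_chars):
--         positions = [i for i in range(len(line) + 1)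
--                      if line.startswith(char, i)][:_FUZZY_ANCHOR_LIMIT]
--         for position in positions:
--             starts.add(min(max(position - offset, 0), max_start))
--     return starts
-- ===== Notes on version B (the rewrite author's own statement) =====
-- stated objective: alternative
-- what changed: A hunts occurrences with a stateful str.find/while loop that interleaves searching, counting hits and if-chain clamping; B instead enumerates every index of the line in a comprehension, keeps those where the anchor matches (startswith on the tail), caps them by list slicing, and clamps with min/max - no find, no while, no hit counter.
import Mathlib
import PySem

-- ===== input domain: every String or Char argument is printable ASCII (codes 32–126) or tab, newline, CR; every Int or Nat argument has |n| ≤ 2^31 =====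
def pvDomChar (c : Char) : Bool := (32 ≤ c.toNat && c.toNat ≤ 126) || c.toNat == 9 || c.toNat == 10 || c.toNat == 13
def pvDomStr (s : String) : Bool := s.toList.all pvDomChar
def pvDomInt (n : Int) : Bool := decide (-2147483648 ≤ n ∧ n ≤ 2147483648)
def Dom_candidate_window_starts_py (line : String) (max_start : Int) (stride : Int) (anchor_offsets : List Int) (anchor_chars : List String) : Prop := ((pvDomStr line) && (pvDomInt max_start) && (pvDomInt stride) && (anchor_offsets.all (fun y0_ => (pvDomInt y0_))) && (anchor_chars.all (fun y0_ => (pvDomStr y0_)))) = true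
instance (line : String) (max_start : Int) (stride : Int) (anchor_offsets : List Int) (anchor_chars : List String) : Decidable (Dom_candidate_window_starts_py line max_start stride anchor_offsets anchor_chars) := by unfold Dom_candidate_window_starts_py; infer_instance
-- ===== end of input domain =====

-- B replaces A's stateful str.find/while hunt (with a hit counter and an if-chain clamp) by a
-- comprehension over all indices of the line filtered by startswith, capped by list slicing and
-- clamped with min/max (objective: alternative).

-- ===== PORT A =====
-- A's while loop runs at most _FUZZY_ANCHOR_LIMIT (=120) times ('hits < 120'): `fuel` is the remaining hit budget
def pvFindLoopA (line char : List Char) (offset max_start : Int) (starts : PySem.Set Int)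
    (position : Int) : Nat → PySem.Set Int
  | 0 => starts
  | Nat.succ fuel =>
      if position = -1 then starts
      else
        let start := position - offset
        let start := if start < 0 then (0 : Int) else start
        let start := if start > max_start then max_start else start
        pvFindLoopA line char offset max_start (PySem.Set.add starts start)
          (PySem.Chars.findFrom line char (position + 1) none) fuel

def candidate_window_starts_py (line : String) (max_start : Int) (stride : Int) (anchor_offsets : List Int) (anchor_chars : List String) : List Int :=
  let starts : PySem.Set Int := PySem.Set.add (PySem.Set.add PySem.Set.empty 0) max_start
  let starts := (PySem.List.pyRange 0 (max_start + 1) stride).foldl PySem.Set.add starts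
  (List.zip anchor_offsets anchor_chars).foldl
    (fun starts oc =>
      pvFindLoopA line.toList oc.2.toList oc.1 max_start starts
        (PySem.Chars.find line.toList oc.2.toList) 120)
    starts

-- ===== PORT B =====
def candidate_window_starts_py_alt (line : String) (max_start : Int) (stride : Int) (anchor_offsets : List Int) (anchor_chars : List String) : List Int :=
  let s := line.toList
  -- {0, max_start, *range(0, max_start + 1, stride)}
  let starts : PySem.Set Int :=
    PySem.Set.update (PySem.Set.add (PySem.Set.add PySem.Set.empty 0) max_start)
      (PySem.List.pyRange 0 (max_start + 1) stride)
  (List.zip anchor_offsets anchor_chars).foldl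
    (fun starts oc =>
      -- [i for i in range(len(line) + 1) if line.startswith(char, i)][:_FUZZY_ANCHOR_LIMIT]
      -- hand-ported predicate: for 0 <= i <= len(line), line.startswith(char, i) is exactly
      -- char being a prefix of line[i:], i.e. Chars.startswith (slice line i none) char
      let positions := PySem.List.slice
        ((PySem.List.pyRange 0 ((s.length : Int) + 1) 1).filter
          (fun i => PySem.Chars.startswith (PySem.List.slice s (some i) none) oc.2.toList))
        none (some 120)
      positions.foldl (fun st p => PySem.Set.add st (min (max (p - oc.1) 0) max_start)) starts)
    starts

-- ===== PRECONDITION & SPEC =====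
-- Pre_ excludes only stride = 0, on which A's range(0, max_start+1, 0) raises ValueError (B raises there too).
def Pre_candidate_window_starts_py (line : String) (max_start : Int) (stride : Int) (anchor_offsets : List Int) (anchor_chars : List String) : Prop := stride ≠ 0
instance (line : String) (max_start : Int) (stride : Int) (anchor_offsets : List Int) (anchor_chars : List String) : Decidable (Pre_candidate_window_starts_py line max_start stride anchor_offsets anchor_chars) := by unfold Pre_candidate_window_starts_py; infer_instance

def pvWitness_candidate_window_starts_py : String × Int × Int × List Int × List String := ("abcab", 3, 1, [1, 0], ["a", "b"])

def Spec_candidate_window_starts_py (line : String) (max_start : Int) (stride : Int) (anchor_offsets : List Int) (anchor_chars : List String) (out : List Int) : Prop := out = candidate_window_starts_py_alt line max_start stride anchor_offsets anchor_chars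
instance (line : String) (max_start : Int) (stride : Int) (anchor_offsets : List Int) (anchor_chars : List String) (out : List Int) : Decidable (Spec_candidate_window_starts_py line max_start stride anchor_offsets anchor_chars out) := by unfold Spec_candidate_window_starts_py; infer_instance

-- ===== CLAIM (what is proved, stated in full; the proofs are below) =====
def Claim_equal_candidate_window_starts_py : Prop := ∀ (line : String) (max_start : Int) (stride : Int) (anchor_offsets : List Int) (anchor_chars : List String), Dom_candidate_window_starts_py line max_start stride anchor_offsets anchor_chars → Pre_candidate_window_starts_py line max_start stride anchor_offsets anchor_chars → Spec_candidate_window_starts_py line max_start stride anchor_offsets anchor_chars (candidate_window_starts_py line max_start stride anchor_offsets anchor_chars)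

-- ===== LEMMAS AND PROOFS =====

-- str.find past the end of the string is -1 (even for the empty needle)
theorem pvFindFrom_past (s sub : List Char) (k : Nat) (hk : s.length < k) :
    PySem.Chars.findFrom s sub (k : Int) none = -1 := by
  simp only [PySem.Chars.findFrom]
  split_ifs <;> omega

-- a prefix of some tail of t is an infix of t
theorem pvPrefix_drop_infix {sub t : List Char} {j : Nat} (h : sub <+: t.drop j) :
    sub <:+: t :=
  h.isInfix.trans (List.drop_suffix j t).isInfix

-- A's in-loop clamping if-chain is B's min/max clamp
theorem pvClamp (x m : Int) :
    (if (if x < 0 then (0 : Int) else x) > m then m else if x < 0 then (0 : Int) else x)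
      = min (max x 0) m := by
  split_ifs <;> omega

-- the comprehension's filter predicate, spelled out
theorem pvP_iff (s sub : List Char) (i : Int) (hi : 0 ≤ i) :
    PySem.Chars.startswith (PySem.List.slice s (some i) none) sub = true ↔ sub <+: s.drop i.toNat := by
  rw [PySem.List.slice_from s hi, PySem.Chars.startswith_iff]

-- core: A's fused find/clamp loop starting at find-from-k equals the clamp folded over the
-- (fuel-capped) filtered index range from k
theorem pvLoop_eq (s sub : List Char) (off m : Int) :
    ∀ (fuel k : Nat), k ≤ s.length + 1 → ∀ (st : PySem.Set Int),
    pvFindLoopA s sub off m st (PySem.Chars.findFrom s sub (k : Int) none) fuel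
      = (((PySem.List.pyRange (k : Int) ((s.length : Int) + 1) 1).filter
            (fun i => PySem.Chars.startswith (PySem.List.slice s (some i) none) sub)).take fuel).foldl
          (fun st p => PySem.Set.add st (min (max (p - off) 0) m)) st := by
  intro fuel
  induction fuel with
  | zero => intro k hk st; simp [pvFindLoopA]
  | succ fuel ih =>
    intro k hk st
    by_cases hke : k = s.length + 1
    · subst hke
      rw [pvFindFrom_past s sub _ (by omega)]
      simp [pvFindLoopA]
    · have hk' : k ≤ s.length := by omega
      rw [PySem.Chars.findFrom_natCast s sub k hk']
      by_cases hr : PySem.Chars.find (s.drop k) sub = -1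
      · -- no further occurrence: the loop stops and the remaining filtered range is empty
        have hno : ¬ sub <:+: s.drop k := (PySem.Chars.find_eq_neg_one_iff _ _).mp hr
        have hfil : (PySem.List.pyRange (k : Int) ((s.length : Int) + 1) 1).filter
            (fun i => PySem.Chars.startswith (PySem.List.slice s (some i) none) sub) = [] := by
          rw [List.filter_eq_nil_iff]
          intro i hi
          rw [PySem.List.mem_pyRange_one] at hi
          intro hP
          have h0 : (0 : Int) ≤ i := le_trans (Int.natCast_nonneg k) hi.1
          have hpre : sub <+: s.drop i.toNat := (pvP_iff s sub i h0).mp hP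
          have hik : k ≤ i.toNat := by omega
          have : s.drop i.toNat = (s.drop k).drop (i.toNat - k) := by
            rw [List.drop_drop]; congr 1; omega
          rw [this] at hpre
          exact hno (pvPrefix_drop_infix hpre)
        rw [hfil, if_pos hr]
        simp [pvFindLoopA]
      · -- next occurrence at p = k + find(drop k): it heads the filtered range
        have hr0 : 0 ≤ PySem.Chars.find (s.drop k) sub := by
          have := PySem.Chars.neg_one_le_find (s.drop k) sub
          omega
        obtain ⟨hhit, hmin⟩ := PySem.Chars.find_spec (s := s.drop k) (sub := sub) hr0
        have hrlen : PySem.Chars.find (s.drop k) sub ≤ (s.drop k).length :=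
          PySem.Chars.find_le_length _ _
        set p : Nat := k + (PySem.Chars.find (s.drop k) sub).toNat with hp
        have hpn : p ≤ s.length := by
          have : (s.drop k).length = s.length - k := by simp
          omega
        have hcast : (k : Int) + PySem.Chars.find (s.drop k) sub = (p : Int) := by
          rw [hp]; push_cast [Int.toNat_of_nonneg hr0]; ring
      -- split the index range at p
        have hsplit : PySem.List.pyRange (k : Int) ((s.length : Int) + 1) 1
            = PySem.List.pyRange (k : Int) (p : Int) 1 ++ PySem.List.pyRange (p : Int) ((s.length : Int) + 1) 1 :=
          PySem.List.pyRange_one_append _ _ _ (by exact_mod_cast (by omega : k ≤ p)) (by exact_mod_cast (by omega : p ≤ s.length + 1))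
        have hfil1 : (PySem.List.pyRange (k : Int) (p : Int) 1).filter
            (fun i => PySem.Chars.startswith (PySem.List.slice s (some i) none) sub) = [] := by
          rw [List.filter_eq_nil_iff]
          intro i hi
          rw [PySem.List.mem_pyRange_one] at hi
          intro hP
          have h0 : (0 : Int) ≤ i := le_trans (Int.natCast_nonneg k) hi.1
          have hpre : sub <+: s.drop i.toNat := (pvP_iff s sub i h0).mp hP
          have hik : k ≤ i.toNat := by omega
          have hilt : i.toNat - k < (PySem.Chars.find (s.drop k) sub).toNat := by omega
          have : s.drop i.toNat = (s.drop k).drop (i.toNat - k) := by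
            rw [List.drop_drop]; congr 1; omega
          rw [this] at hpre
          exact hmin _ hilt hpre
        have hcons : PySem.List.pyRange (p : Int) ((s.length : Int) + 1) 1
            = (p : Int) :: PySem.List.pyRange ((p : Int) + 1) ((s.length : Int) + 1) 1 :=
          PySem.List.pyRange_one_cons (by exact_mod_cast (by omega : p < s.length + 1))
        have hPp : PySem.Chars.startswith (PySem.List.slice s (some (p : Int)) none) sub = true := by
          rw [pvP_iff s sub _ (Int.natCast_nonneg p)]
          have : s.drop ((p : Int)).toNat = (s.drop k).drop (PySem.Chars.find (s.drop k) sub).toNat := by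
            rw [List.drop_drop]; congr 1
          rw [this]
          exact hhit
        have hfc : ((p : Int) :: PySem.List.pyRange ((p : Int) + 1) ((s.length : Int) + 1) 1).filter
            (fun i => PySem.Chars.startswith (PySem.List.slice s (some i) none) sub)
            = (p : Int) :: (PySem.List.pyRange ((p : Int) + 1) ((s.length : Int) + 1) 1).filter
              (fun i => PySem.Chars.startswith (PySem.List.slice s (some i) none) sub) := by
          exact List.filter_cons_of_pos (by exact hPp)
        rw [hsplit, List.filter_append, hfil1, List.nil_append, hcons, hfc,
            List.take_succ_cons, List.foldl_cons]
        -- unfold one step of A's loop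
        have hpos : ¬ ((k : Int) + PySem.Chars.find (s.drop k) sub = -1) := by omega
        rw [if_neg hr, pvFindLoopA, if_neg hpos]
        simp only []
        rw [pvClamp, hcast]
        have : ((p : Int)) + 1 = ((p + 1 : Nat) : Int) := by push_cast; ring
        rw [this, ih (p + 1) (by omega)]

-- per (offset, char) pair: A's find/while body equals B's comprehension body
theorem pvPair_eq (s sub : List Char) (off m : Int) (st : PySem.Set Int) :
    pvFindLoopA s sub off m st (PySem.Chars.find s sub) 120
      = (PySem.List.slice
          ((PySem.List.pyRange 0 ((s.length : Int) + 1) 1).filter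
            (fun i => PySem.Chars.startswith (PySem.List.slice s (some i) none) sub))
          none (some 120)).foldl
          (fun st p => PySem.Set.add st (min (max (p - off) 0) m)) st := by
  rw [PySem.List.slice_to _ (by norm_num : (0:Int) ≤ 120)]
  have h0 : PySem.Chars.find s sub = PySem.Chars.findFrom s sub ((0 : Nat) : Int) none := by
    simp [PySem.Chars.findFrom_zero]
  rw [h0, pvLoop_eq s sub off m 120 0 (by omega)]
  simp

-- ===== VERDICT (by name: the statement is the Claim_ definition above) =====
theorem candidate_window_starts_py_spec : Claim_equal_candidate_window_starts_py := by
  intro line max_start stride anchor_offsets anchor_chars _ _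
  unfold Spec_candidate_window_starts_py candidate_window_starts_py candidate_window_starts_py_alt
  simp only [PySem.Set.update]
  apply List.foldl_ext
  intro st oc _
  exact pvPair_eq line.toList oc.2.toList oc.1 max_start st
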